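-- pv_equiv track=rewrite | github.com/DancingOnAir/LeetcodePythonSolution | bit_manipulation/1318_minimum_flips_to_make_a_or_b_equal_to_c.py | minFlips1
-- ===== SOURCE A (Python) =====
-- def minFlips1(a: int, b: int, c: int) -> int:
--     s = bin(((a | b) ^ c))[2:][::-1]
--     res = 0
--     for i, v in enumerate(s):
--         if v == '1':
--             if (c & (1 << i)) > 0:
--                 res += 1
--             else:
--                 if (a & (1 << i)) > 0:
--                     res += 1
--                 if (b & (1 << i)) > 0:
--                     res += 1
--     return res
-- ===== SOURCE B (Python) =====
-- # Three bitmask popcounts instead of building a reversed binary string and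
-- # branching per bit position.
-- def minFlips1(a: int, b: int, c: int) -> int:
--     m = (a | b) ^ c          # positions where a|b already differs from c
--     return (m & c).bit_count() + (m & a & ~c).bit_count() + (m & b & ~c).bit_count()
-- ===== Notes on version B (the rewrite author's own statement) =====
-- stated objective: idiomatic
-- what changed: Replaces the reversed-binary-string build and the per-position if/else loop with three bitmask intersections whose popcounts are summed; Pre_ excludes inputs whose xor (a|b)^c is negative, where a|b and c differ in sign, no finite flip count can make a|b equal c, and A's and B's finite answers are equally arbitrary.
-- outside the precondition, e.g. on minFlips1(1, 0, -2): A returns 1, B returns 2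
import Mathlib
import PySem

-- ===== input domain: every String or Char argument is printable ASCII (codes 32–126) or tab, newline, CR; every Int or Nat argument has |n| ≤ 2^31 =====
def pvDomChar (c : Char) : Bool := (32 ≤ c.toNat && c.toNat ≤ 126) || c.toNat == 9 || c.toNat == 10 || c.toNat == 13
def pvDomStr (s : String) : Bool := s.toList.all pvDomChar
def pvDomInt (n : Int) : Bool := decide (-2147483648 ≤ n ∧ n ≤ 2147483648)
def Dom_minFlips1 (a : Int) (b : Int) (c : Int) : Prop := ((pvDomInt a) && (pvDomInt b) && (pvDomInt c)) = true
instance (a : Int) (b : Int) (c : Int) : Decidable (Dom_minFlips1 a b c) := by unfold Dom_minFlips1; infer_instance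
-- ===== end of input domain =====

-- B replaces A's reversed-binary-string loop by three bitmask popcounts; equivalence is
-- claimed on the inputs with (a|b)^c nonnegative (Pre_ below).

-- ===== PORT A =====
-- the body of "for i, v in enumerate(s)": res += ... per the nested ifs
def minFlips1Step (a : Int) (b : Int) (c : Int) (res : Int) (iv : Int × Char) : Int :=
  if iv.2 = '1' then
    -- enumerate indices are ≥ 0, so Python's 1 << i is exactly (1 : Int) <<< i.toNat
    if 0 < PySem.Int.band c ((1 : Int) <<< iv.1.toNat) then res + 1
    else
      (res + (if 0 < PySem.Int.band a ((1 : Int) <<< iv.1.toNat) then 1 else 0))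
          + (if 0 < PySem.Int.band b ((1 : Int) <<< iv.1.toNat) then 1 else 0)
  else res

-- s = bin(((a | b) ^ c))[2:][::-1]; res = 0; for i, v in enumerate(s): ...
def minFlips1 (a : Int) (b : Int) (c : Int) : Int :=
  let s0 : String := PySem.Int.pyBin (PySem.Int.bxor (PySem.Int.bor a b) c)
  let s1 : String := PySem.Str.slice s0 (some 2) none
  -- s1[::-1]; a step of -1 never raises, so the option is always some
  let s : String := (PySem.Str.slice? s1 none none (-1)).getD ""
  (PySem.List.enumerate s.toList).foldl (minFlips1Step a b c) 0

-- ===== PORT B =====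
-- m = (a | b) ^ c; return (m & c).bit_count() + (m & a & ~c).bit_count() + (m & b & ~c).bit_count()
def minFlips1_alt (a : Int) (b : Int) (c : Int) : Int :=
  let m : Int := PySem.Int.bxor (PySem.Int.bor a b) c
  ((PySem.Int.bitCount (PySem.Int.band m c) : Int)
    + (PySem.Int.bitCount (PySem.Int.band (PySem.Int.band m a) (Int.not c)) : Int)
    + (PySem.Int.bitCount (PySem.Int.band (PySem.Int.band m b) (Int.not c)) : Int))

-- ===== PRECONDITION & SPEC =====
-- Pre_ excludes inputs whose xor (a|b)^c is negative: there a|b and c differ in sign, no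
-- finite number of flips can make a|b equal c, and A's and B's finite answers are equally arbitrary.
def Pre_minFlips1 (a : Int) (b : Int) (c : Int) : Prop :=
  0 ≤ PySem.Int.bxor (PySem.Int.bor a b) c
instance (a : Int) (b : Int) (c : Int) : Decidable (Pre_minFlips1 a b c) := by unfold Pre_minFlips1; infer_instance
def pvWitness_minFlips1 : Int × Int × Int := (2, 2, 5)

def Spec_minFlips1 (a : Int) (b : Int) (c : Int) (out : Int) : Prop := out = minFlips1_alt a b c
instance (a : Int) (b : Int) (c : Int) (out : Int) : Decidable (Spec_minFlips1 a b c out) := by unfold Spec_minFlips1; infer_instance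

-- ===== CLAIM (what is proved, stated in full; the proofs are below) =====
def Claim_equal_minFlips1 : Prop := ∀ (a : Int) (b : Int) (c : Int), Dom_minFlips1 a b c → Pre_minFlips1 a b c → Spec_minFlips1 a b c (minFlips1 a b c)

-- ===== LEMMAS AND PROOFS =====

-- Python's view of bit k of an arbitrary int x (two's complement for x < 0)
def pvBit (x : Int) (k : Nat) : Bool := if 0 ≤ x then x.toNat.testBit k else !((-x - 1).toNat.testBit k)

-- A's contribution of one differing bit position
def pvContrib (a b c : Int) (k : Nat) : Int :=
  if pvBit c k then 1 else ((if pvBit a k then 1 else 0) + (if pvBit b k then 1 else 0))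

-- band of a nonnegative m with an arbitrary int, as a Nat
def pvBandN (m : Nat) (x : Int) : Nat := if 0 ≤ x then m &&& x.toNat else m - (m &&& (-x - 1).toNat)

-- bin(n)'s digits of n ≥ 0, least significant first
def pvRevBits (n : Nat) : List Char :=
  if h : n < 2 then [Nat.digitChar n] else (n % 2).digitChar :: pvRevBits (n / 2)

-- A's loop total over the bits of n, starting at position k
def pvAsum (a b c : Int) (n k : Nat) : Int :=
  (if n.testBit 0 then pvContrib a b c k else 0) +
    (if h : n < 2 then 0 else pvAsum a b c (n / 2) (k + 1))

theorem pv_land_mod_two (m y : Nat) : (m &&& y) % 2 = 1 ↔ (m % 2 = 1 ∧ y % 2 = 1) := by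
  have h := Nat.testBit_land m y 0
  simp only [Nat.testBit_zero] at h
  rcases Nat.mod_two_eq_zero_or_one m with hm | hm <;>
    rcases Nat.mod_two_eq_zero_or_one y with hy | hy <;>
      simp [hm, hy] at h ⊢

theorem pv_sub_and_testBit (j m y : Nat) :
    (m - (m &&& y)).testBit j = (m.testBit j && !(y.testBit j)) := by
  induction j generalizing m y with
  | zero =>
    have h1 := pv_land_mod_two m y
    have h2 : (m &&& y) / 2 ≤ m / 2 := by
      rw [Nat.and_div_two]; exact Nat.and_le_left
    have key : (m - (m &&& y)) % 2 = 1 ↔ (m % 2 = 1 ∧ ¬ (y % 2 = 1)) := by omega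
    simp only [Nat.testBit_zero]
    by_cases hm : m % 2 = 1 <;> by_cases hy : y % 2 = 1 <;> simp [hm, hy, key]
  | succ j ih =>
    have h1 := pv_land_mod_two m y
    have hs2 : (m &&& y) / 2 = (m / 2) &&& (y / 2) := Nat.and_div_two
    have hle : (m / 2) &&& (y / 2) ≤ m / 2 := Nat.and_le_left
    have hdiv : (m - (m &&& y)) / 2 = m / 2 - ((m / 2) &&& (y / 2)) := by omega
    rw [Nat.testBit_add_one, Nat.testBit_add_one, Nat.testBit_add_one, hdiv]
    exact ih (m / 2) (y / 2)

theorem pv_band_natCast_eq (m : Nat) (x : Int) :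
    PySem.Int.band (↑m) x = ↑(pvBandN m x) := by
  by_cases hx : 0 ≤ x <;> simp [PySem.Int.band, pvBandN, hx]

theorem pv_bandN_testBit (m : Nat) (x : Int) (j : Nat) :
    (pvBandN m x).testBit j = (m.testBit j && pvBit x j) := by
  by_cases hx : 0 ≤ x
  · simp [pvBandN, pvBit, hx]
  · simp [pvBandN, pvBit, hx, pv_sub_and_testBit]

theorem pv_not_eq (c : Int) : Int.not c = -c - 1 := by
  cases c with
  | ofNat n =>
    rw [show Int.not (Int.ofNat n) = Int.negSucc n from rfl, Int.negSucc_eq, Int.ofNat_eq_natCast]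
    ring
  | negSucc n =>
    rw [show Int.not (Int.negSucc n) = Int.ofNat n from rfl, Int.negSucc_eq, Int.ofNat_eq_natCast]
    ring

theorem pv_bit_not (c : Int) (k : Nat) : pvBit (Int.not c) k = !(pvBit c k) := by
  rw [pv_not_eq]
  unfold pvBit
  by_cases hc : 0 ≤ c
  · rw [if_neg (by omega : ¬ (0 : Int) ≤ -c - 1), if_pos hc]
    have h2 : (-(-c - 1) - 1) = c := by ring
    rw [h2]
  · rw [if_pos (by omega : (0 : Int) ≤ -c - 1), if_neg hc, Bool.not_not]

theorem pv_one_shiftLeft (k : Nat) : ((1 : Int) <<< k) = ((2 ^ k : Nat) : Int) := by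
  show Int.ofNat 1 <<< k = _
  simp [Int.shiftLeft_eq]

theorem pv_lt_band_iff (x : Int) (k : Nat) :
    (0 < PySem.Int.band x ((1 : Int) <<< k)) ↔ pvBit x k = true := by
  rw [pv_one_shiftLeft, PySem.Int.band_comm, pv_band_natCast_eq]
  unfold pvBandN pvBit
  have hp : 0 < 2 ^ k := Nat.two_pow_pos k
  by_cases hx : 0 ≤ x
  · rw [if_pos hx, if_pos hx, Nat.two_pow_and]
    cases h : x.toNat.testBit k
    · simp
    · simp
  · rw [if_neg hx, if_neg hx, Nat.two_pow_and]
    cases h : (-x - 1).toNat.testBit k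
    · simp
    · simp

theorem pv_bitCount_sum (n : Nat) (L : Nat) (hL : ∀ j, L ≤ j → n.testBit j = false) :
    (PySem.Int.bitCount (↑n) : Int) = ∑ j ∈ Finset.range L, (if n.testBit j then (1 : Int) else 0) := by
  induction n using Nat.strong_induction_on generalizing L with
  | _ n ih =>
    rcases Nat.eq_zero_or_pos n with hn | hn
    · subst hn
      simp [PySem.Int.bitCount_zero, Nat.zero_testBit]
    · cases L with
      | zero =>
        exact absurd (Nat.zero_of_testBit_eq_false fun i => hL i (Nat.zero_le i)) (by omega)
      | succ L' =>
        rw [Finset.sum_range_succ']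
        have hrec := PySem.Int.bitCount_natCast hn
        have h2 : ∀ j, L' ≤ j → (n / 2).testBit j = false := by
          intro j hj
          rw [← Nat.testBit_add_one]
          exact hL (j + 1) (by omega)
        have := ih (n / 2) (Nat.div_lt_self hn (by norm_num)) L' h2
        have hbit0 : ((n % 2 : Nat) : Int) = if n.testBit 0 then (1 : Int) else 0 := by
          simp only [Nat.testBit_zero]
          have : n % 2 = 0 ∨ n % 2 = 1 := by omega
          rcases this with h | h <;> simp [h]
        have heq : ∀ j, n.testBit (j + 1) = (n / 2).testBit j := fun j => Nat.testBit_add_one n j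
        calc (PySem.Int.bitCount (↑n) : Int)
            = ((n % 2 : Nat) : Int) + (PySem.Int.bitCount (↑(n / 2)) : Int) := by rw [hrec]; push_cast; ring
          _ = (∑ j ∈ Finset.range L', (if (n / 2).testBit j then (1 : Int) else 0))
                + ((n % 2 : Nat) : Int) := by rw [this]; ring
          _ = _ := by rw [hbit0]; simp only [heq]

theorem pv_asum_sum (a b c : Int) (n k L : Nat) (hL : ∀ j, L ≤ j → n.testBit j = false) :
    pvAsum a b c n k = ∑ j ∈ Finset.range L, (if n.testBit j then pvContrib a b c (k + j) else 0) := by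
  induction n using Nat.strong_induction_on generalizing k L with
  | _ n ih =>
    rcases Nat.eq_zero_or_pos n with hn | hn
    · subst hn
      rw [pvAsum]
      simp [Nat.zero_testBit]
    · cases L with
      | zero =>
        exact absurd (Nat.zero_of_testBit_eq_false fun i => hL i (Nat.zero_le i)) (by omega)
      | succ L' =>
        rw [Finset.sum_range_succ']
        have h2 : ∀ j, L' ≤ j → (n / 2).testBit j = false := by
          intro j hj
          rw [← Nat.testBit_add_one]
          exact hL (j + 1) (by omega)
        have htail : (if h : n < 2 then (0 : Int) else pvAsum a b c (n / 2) (k + 1)) =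
            pvAsum a b c (n / 2) (k + 1) := by
          split_ifs with h
          · have h0 : n / 2 = 0 := by omega
            rw [h0, pvAsum]
            simp
          · rfl
        rw [pvAsum, htail, ih (n / 2) (Nat.div_lt_self hn (by norm_num)) (k + 1) L' h2]
        have heq : ∀ j, n.testBit (j + 1) = (n / 2).testBit j := fun j => Nat.testBit_add_one n j
        simp only [heq]
        have harg : ∀ j : Nat, k + 1 + j = k + (j + 1) := by omega
        simp only [harg]
        ring_nf

theorem pv_step_char (a b c res : Int) (k : Nat) (v : Char) :
    minFlips1Step a b c res ((k : Int), v) =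
      res + (if v = '1' then pvContrib a b c k else 0) := by
  unfold minFlips1Step pvContrib
  by_cases hv : v = '1'
  · simp only [hv, Int.toNat_natCast]
    by_cases hc : pvBit c k = true
    · rw [if_pos ((pv_lt_band_iff c k).mpr hc), if_pos hc]
      simp
    · rw [if_neg (fun h => hc ((pv_lt_band_iff c k).mp h)), if_neg hc]
      by_cases ha : pvBit a k = true <;> by_cases hb : pvBit b k = true <;>
        (simp [ha, hb, pv_lt_band_iff]; try omega)
  · simp [hv]

theorem pv_loop (a b c : Int) (n : Nat) : ∀ (k : Nat) (res : Int),
    (PySem.List.enumerate (pvRevBits n) (k : Int)).foldl (minFlips1Step a b c) res =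
      res + pvAsum a b c n k := by
  induction n using pvRevBits.induct with
  | case1 n h =>
    intro k res
    rw [pvRevBits]
    rw [dif_pos h]
    rw [PySem.List.enumerate_cons, PySem.List.enumerate_nil]
    simp only [List.foldl_cons, List.foldl_nil]
    rw [pv_step_char, pvAsum]
    rw [dif_pos h]
    interval_cases n <;> simp [Nat.digitChar, Nat.testBit_zero]
  | case2 n h ih =>
    intro k res
    rw [pvRevBits]
    rw [dif_neg h]
    rw [PySem.List.enumerate_cons]
    simp only [List.foldl_cons]
    rw [pv_step_char]
    have hk : ((k : Int) + 1) = ((k + 1 : Nat) : Int) := by push_cast; ring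
    rw [hk, ih (k + 1) _]
    conv_rhs => rw [pvAsum]
    rw [dif_neg h]
    have hchar : ((n % 2).digitChar = '1') = (n.testBit 0 = true) := by
      simp only [Nat.testBit_zero]
      have h2 : n % 2 = 0 ∨ n % 2 = 1 := by omega
      rcases h2 with h2 | h2 <;> simp [h2, Nat.digitChar]
    simp only [hchar]
    ring

theorem pv_loop0 (a b c : Int) (n : Nat) (res : Int) :
    (PySem.List.enumerate (pvRevBits n)).foldl (minFlips1Step a b c) res =
      res + pvAsum a b c n 0 := by
  have h := pv_loop a b c n 0 res
  simpa using h

theorem pv_toDigitsCore (fuel n : Nat) (ds : List Char) (h : n < fuel) :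
    Nat.toDigitsCore 2 fuel n ds = (pvRevBits n).reverse ++ ds := by
  induction fuel generalizing n ds with
  | zero => omega
  | succ fuel ih =>
    rw [Nat.toDigitsCore]
    by_cases h2 : n / 2 = 0
    · rw [if_pos h2]
      have hn2 : n < 2 := by omega
      rw [show pvRevBits n = [Nat.digitChar n] from by rw [pvRevBits, dif_pos hn2],
        Nat.mod_eq_of_lt hn2]
      simp
    · rw [if_neg h2, ih (n / 2) _ (by omega),
        show pvRevBits n = (n % 2).digitChar :: pvRevBits (n / 2) from by
          rw [pvRevBits, dif_neg (by omega : ¬ n < 2)]]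
      simp

theorem pv_toDigits (n : Nat) : Nat.toDigits 2 n = (pvRevBits n).reverse := by
  rw [Nat.toDigits, pv_toDigitsCore (n + 1) n [] (by omega), List.append_nil]

theorem pv_bit_bound (m : Nat) (j : Nat) (h : m + 1 ≤ j) : m.testBit j = false := by
  apply Nat.testBit_eq_false_of_lt
  calc m < 2 ^ m := Nat.lt_two_pow_self
    _ ≤ 2 ^ j := Nat.pow_le_pow_right (by norm_num) (by omega)

theorem pv_A_eq (a b c : Int) :
    minFlips1 a b c = pvAsum a b c (PySem.Int.bxor (PySem.Int.bor a b) c).natAbs 0 := by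
  simp only [minFlips1]
  set d : Int := PySem.Int.bxor (PySem.Int.bor a b) c with hd
  set m : Nat := d.natAbs with hm
  rw [PySem.Str.slice?_none_none_neg_one]
  simp only [Option.getD_some]
  rw [show (String.ofList ((PySem.Str.slice (PySem.Int.pyBin d) (some 2) none).toList.reverse)).toList
      = (PySem.Str.slice (PySem.Int.pyBin d) (some 2) none).toList.reverse from by simp]
  rw [PySem.Str.toList_slice, PySem.Chars.slice_eq_listSlice]
  rw [show (some (2 : Int)) = (some ((2 : Nat) : Int)) from by norm_num,
    PySem.List.slice_from_natCast]
  by_cases hdpos : 0 ≤ d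
  · rw [show (PySem.Int.pyBin d).toList = '0' :: 'b' :: Nat.toDigits 2 d.toNat from by
      rw [PySem.Int.toList_pyBin, PySem.Int.toBinChars0b, if_neg (not_lt.mpr hdpos)]]
    simp only [List.drop_succ_cons, List.drop_zero]
    rw [pv_toDigits, List.reverse_reverse, show d.toNat = m from by rw [hm]; omega]
    rw [pv_loop0 a b c m 0, zero_add]
  · have hdneg : d < 0 := by omega
    rw [show (PySem.Int.pyBin d).toList = '-' :: '0' :: 'b' :: Nat.toDigits 2 m from by
      rw [PySem.Int.toList_pyBin, PySem.Int.toBinChars0b, if_pos hdneg, hm]]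
    simp only [List.drop_succ_cons, List.drop_zero]
    rw [pv_toDigits, show ('b' :: (pvRevBits m).reverse).reverse = pvRevBits m ++ ['b'] from by simp]
    rw [PySem.List.enumerate_append, List.foldl_append, pv_loop0 a b c m 0, zero_add]
    rw [PySem.List.enumerate_cons, PySem.List.enumerate_nil]
    simp only [List.foldl_cons, List.foldl_nil]
    unfold minFlips1Step
    rw [if_neg (by decide : ¬ ('b' = '1'))]

theorem pv_main (a b c : Int) (hpre : 0 ≤ PySem.Int.bxor (PySem.Int.bor a b) c) :
    minFlips1 a b c = minFlips1_alt a b c := by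
  rw [pv_A_eq]
  simp only [minFlips1_alt]
  set d : Int := PySem.Int.bxor (PySem.Int.bor a b) c with hd
  set m : Nat := d.natAbs with hm
  have hcast : d = ((m : Nat) : Int) := by rw [hm]; omega
  have hb1 : PySem.Int.band d c = ((pvBandN m c : Nat) : Int) := by
    rw [hcast, pv_band_natCast_eq]
  have hb2 : PySem.Int.band (PySem.Int.band d a) (Int.not c)
      = ((pvBandN (pvBandN m a) (Int.not c) : Nat) : Int) := by
    rw [hcast, pv_band_natCast_eq, pv_band_natCast_eq]
  have hb3 : PySem.Int.band (PySem.Int.band d b) (Int.not c)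
      = ((pvBandN (pvBandN m b) (Int.not c) : Nat) : Int) := by
    rw [hcast, pv_band_natCast_eq, pv_band_natCast_eq]
  rw [hb1, hb2, hb3]
  have hLb : ∀ (x : Int) (j : Nat), m + 1 ≤ j → (pvBandN m x).testBit j = false := by
    intro x j hj
    rw [pv_bandN_testBit, pv_bit_bound m j hj]
    simp
  have hLb2 : ∀ (x : Int) (j : Nat), m + 1 ≤ j →
      (pvBandN (pvBandN m x) (Int.not c)).testBit j = false := by
    intro x j hj
    rw [pv_bandN_testBit, pv_bandN_testBit, pv_bit_bound m j hj]
    simp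
  rw [pv_bitCount_sum (pvBandN m c) (m + 1) (hLb c),
    pv_bitCount_sum (pvBandN (pvBandN m a) (Int.not c)) (m + 1) (hLb2 a),
    pv_bitCount_sum (pvBandN (pvBandN m b) (Int.not c)) (m + 1) (hLb2 b)]
  rw [pv_asum_sum a b c m 0 (m + 1) (fun j hj => pv_bit_bound m j hj)]
  rw [← Finset.sum_add_distrib, ← Finset.sum_add_distrib]
  apply Finset.sum_congr rfl
  intro j _
  simp only [pv_bandN_testBit, pv_bit_not, Nat.zero_add]
  by_cases hmj : m.testBit j <;> by_cases hcj : pvBit c j <;>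
    by_cases haj : pvBit a j <;> by_cases hbj : pvBit b j <;>
      simp [hmj, hcj, haj, hbj, pvContrib]

-- ===== VERDICT (by name: the statement is the Claim_ definition above) =====
theorem minFlips1_spec : Claim_equal_minFlips1 := by
  intro a b c _ hpre
  unfold Spec_minFlips1
  exact pv_main a b c hpre
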